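-- pv_equiv track=rewrite | github.com/krishnaji020210/Radhagraver | Grabber/modules/harem.py | paginate_groups
-- ===== SOURCE A (Python) =====
-- PER_PAGE = 10
--
-- def paginate_groups(groups):
--     """
--     Build pages (list). Each page contains a list of (group_key, waifus_list_for_that_group_on_this_page, group_meta)
--     Ensures each page has up to PER_PAGE waifus (headers included only when their group's waifus appear on page).
--     """
--     pages = []
--     current_page = []
--     current_count = 0
--
--     for group_key, items, meta in groups:
--         idx = 0
--         while idx < len(items):
--             remaining = PER_PAGE - current_count
--             take = min(remaining, len(items) - idx)
--             slice_items = items[idx: idx + take]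
--
--             # append group chunk to current_page
--             current_page.append((group_key, slice_items, meta))
--
--             current_count += take
--             idx += take
--
--             # if page full, push and reset
--             if current_count >= PER_PAGE:
--                 pages.append(current_page)
--                 current_page = []
--                 current_count = 0
--
--         # continue to next group (group header will be repeated on next page if its items continue)
--     # push last page if non-empty
--     if current_page:
--         pages.append(current_page)
--
--     # Ensure at least one page
--     if not pages:
--         pages = [[]]
--
--     return pages
-- ===== SOURCE B (Python) =====
-- PER_PAGE = 10
--
-- def merge_runs(block):
--     # merge maximal runs of tagged items sharing the same group index
--     if not block:
--         return []
--     gi, key, item, meta = block[0]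
--     rest = merge_runs(block[1:])
--     if rest and rest[0][0] == gi:
--         return [(gi, key, [item] + rest[0][2], meta)] + rest[1:]
--     return [(gi, key, [item], meta)] + rest
--
-- def paginate_groups(groups):
--     flat = [(gi, key, item, meta)
--             for gi, (key, items, meta) in enumerate(groups)
--             for item in items]
--     pages = []
--     i = 0
--     while i < len(flat):
--         block = flat[i:i + PER_PAGE]
--         pages.append([(key, its, meta) for gi, key, its, meta in merge_runs(block)])
--         i += PER_PAGE
--     return pages or [[]]
-- ===== Notes on version B (the rewrite author's own statement) =====
-- stated objective: alternative
-- what changed: Replaces A's stateful page-filling loop (nested for/while threading pages/current_page/current_count) with a flatten-chunk-merge pipeline: tag every item with its group index, slice the flat list into consecutive blocks of PER_PAGE, and rebuild each page by merging maximal runs of equal group index.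
import Mathlib
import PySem

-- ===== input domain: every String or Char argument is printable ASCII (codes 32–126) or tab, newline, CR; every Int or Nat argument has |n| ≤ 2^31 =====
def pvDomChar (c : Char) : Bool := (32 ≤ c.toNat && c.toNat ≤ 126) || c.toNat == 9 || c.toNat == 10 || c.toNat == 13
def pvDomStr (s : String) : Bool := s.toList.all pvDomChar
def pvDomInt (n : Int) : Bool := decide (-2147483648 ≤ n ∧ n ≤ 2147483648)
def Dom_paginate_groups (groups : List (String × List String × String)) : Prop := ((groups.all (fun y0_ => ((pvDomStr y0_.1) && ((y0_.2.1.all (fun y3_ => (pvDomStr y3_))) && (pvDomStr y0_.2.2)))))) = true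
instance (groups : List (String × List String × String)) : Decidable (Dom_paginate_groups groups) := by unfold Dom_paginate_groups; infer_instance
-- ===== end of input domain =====

-- B paginates by a different decomposition (flatten → chunk into 10s → merge runs) instead of A's
-- stateful page-filling loop; objective: alternative (same asymptotic cost).

-- ===== PORT A =====
-- inner 'while idx < len(items)' loop, transliterated as recursion on the unprocessed suffix of
-- items (slice items[idx:idx+take] = suffix.take take); current_count kept as Nat (it stays in
-- [0,10) at every reachable loop entry, where Nat and Python int arithmetic agree).
-- The 'take = 0' guard only makes the recursion total: Python would loop forever there, and that
-- state is unreachable from paginate_groups.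
def pgWhileA (key mta : String) (cnt : Nat) (cp : List (String × List String × String))
    (pages : List (List (String × List String × String))) :
    List String → List (List (String × List String × String)) × List (String × List String × String) × Nat
  | [] => (pages, cp, cnt)
  | it :: rest =>
    let its := it :: rest
    let take := min (10 - cnt) its.length
    if _h : take = 0 then (pages, cp, cnt)
    else
      let slice := its.take take
      let cp' := cp ++ [(key, slice, mta)]
      let cnt' := cnt + take
      if 10 ≤ cnt' then pgWhileA key mta 0 [] (pages ++ [cp']) (its.drop take)
      else pgWhileA key mta cnt' cp' pages (its.drop take)
  termination_by its => its.length
  decreasing_by all_goals (simp [List.length_drop]; omega)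

def paginate_groups (groups : List (String × List String × String)) : List (List (String × List String × String)) :=
  let st := groups.foldl
    (fun (st : List (List (String × List String × String)) × List (String × List String × String) × Nat) g =>
      pgWhileA g.1 g.2.2 st.2.2 st.2.1 st.1 g.2.1) ([], [], 0)
  let pages := if st.2.1 ≠ [] then st.1 ++ [st.2.1] else st.1
  if pages = [] then [[]] else pages

-- ===== PORT B =====
-- flat = [(gi, key, item, meta) for gi,(key,items,meta) in enumerate(groups) for item in items]
def pgFlat (groups : List (String × List String × String)) : List (Int × String × String × String) :=
  (PySem.List.enumerate groups 0).flatMap (fun p => p.2.2.1.map (fun it => (p.1, p.2.1, it, p.2.2.2)))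

-- merge_runs, recursion on block exactly as in Source B
def pgMergeRuns : List (Int × String × String × String) → List (Int × String × List String × String)
  | [] => []
  | (gi, key, item, mta) :: bs =>
    match pgMergeRuns bs with
    | [] => [(gi, key, [item], mta)]
    | r :: rs => if r.1 = gi then (gi, key, item :: r.2.2.1, mta) :: rs
                 else (gi, key, [item], mta) :: r :: rs

-- the 'while i < len(flat):' loop of Source B; the slice flat[i:i+10] (0 ≤ i < len) is exactly
-- (flat.drop i).take 10
def pgLoopB (flat : List (Int × String × String × String)) (i : Nat) :
    List (List (String × List String × String)) :=
  if _h : i < flat.length then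
    ((pgMergeRuns ((flat.drop i).take 10)).map (fun r => (r.2.1, r.2.2.1, r.2.2.2)))
      :: pgLoopB flat (i + 10)
  else []
  termination_by flat.length - i
  decreasing_by omega

def paginate_groups_alt (groups : List (String × List String × String)) : List (List (String × List String × String)) :=
  let pages := pgLoopB (pgFlat groups) 0
  if pages = [] then [[]] else pages   -- 'return pages or [[]]'

-- ===== PRECONDITION & SPEC =====
def Spec_paginate_groups (groups : List (String × List String × String)) (out : List (List (String × List String × String))) : Prop := out = paginate_groups_alt groups
instance (groups : List (String × List String × String)) (out : List (List (String × List String × String))) : Decidable (Spec_paginate_groups groups out) := by unfold Spec_paginate_groups; infer_instance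

-- ===== CLAIM (what is proved, stated in full; the proofs are below) =====
def Claim_equal_paginate_groups : Prop := ∀ (groups : List (String × List String × String)), Dom_paginate_groups groups → Spec_paginate_groups groups (paginate_groups groups)

-- ===== LEMMAS AND PROOFS =====

-- the tagged items contributed by one group with index n
def pgTags (n : Int) (k m : String) (its : List String) : List (Int × String × String × String) :=
  its.map (fun it => (n, k, it, m))

-- the flat list of a group suffix, tagging from index n
def pgFlatFrom (n : Int) : List (String × List String × String) → List (Int × String × String × String)
  | [] => []
  | (k, its, m) :: gs => pgTags n k m its ++ pgFlatFrom (n + 1) gs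

def pgStrip (c : List (Int × String × String × String)) : List (String × List String × String) :=
  (pgMergeRuns c).map (fun r => (r.2.1, r.2.2.1, r.2.2.2))

-- chunk a tagged list into the full 10-blocks and the final partial block (possibly empty)
def pgFullCM (l : List (Int × String × String × String)) :
    List (List (Int × String × String × String)) × List (Int × String × String × String) :=
  if _h : 10 ≤ l.length then
    let r := pgFullCM (l.drop 10)
    (l.take 10 :: r.1, r.2)
  else ([], l)
  termination_by l.length
  decreasing_by simp; omega

theorem pgMergeRuns_cons (gi : Int) (k it m : String) (bs : List (Int × String × String × String)) :
    pgMergeRuns ((gi, k, it, m) :: bs)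
      = match pgMergeRuns bs with
        | [] => [(gi, k, [it], m)]
        | r :: rs => if r.1 = gi then (gi, k, it :: r.2.2.1, m) :: rs
                     else (gi, k, [it], m) :: r :: rs := rfl

theorem pgMergeRuns_eq_nil_iff (l : List (Int × String × String × String)) :
    pgMergeRuns l = [] ↔ l = [] := by
  cases l with
  | nil => simp [pgMergeRuns]
  | cons t ts =>
    obtain ⟨gi, k, it, m⟩ := t
    simp only [pgMergeRuns]
    rcases h : pgMergeRuns ts with _ | ⟨r, rs⟩ <;> (simp; try split) <;> simp

theorem pgMergeRuns_gi_mem {l : List (Int × String × String × String)}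
    {r : Int × String × List String × String} (h : r ∈ pgMergeRuns l) : ∃ t ∈ l, r.1 = t.1 := by
  induction l with
  | nil => simp [pgMergeRuns] at h
  | cons t ts ih =>
    obtain ⟨gi, k, it, m⟩ := t
    simp only [pgMergeRuns] at h
    rcases hm : pgMergeRuns ts with _ | ⟨r0, rs⟩
    · rw [hm] at h; simp at h; subst h; exact ⟨(gi, k, it, m), by simp, rfl⟩
    · rw [hm] at h
      by_cases hgi : r0.1 = gi
      · simp [hgi] at h
        rcases h with h | h
        · subst h; exact ⟨(gi, k, it, m), by simp, rfl⟩
        · obtain ⟨t', ht', he⟩ := ih (by rw [hm]; exact List.mem_cons_of_mem _ h)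
          exact ⟨t', List.mem_cons_of_mem _ ht', he⟩
      · simp [hgi] at h
        rcases h with h | h
        · subst h; exact ⟨(gi, k, it, m), by simp, rfl⟩
        · obtain ⟨t', ht', he⟩ := ih (by rw [hm]; exact List.mem_cons.2 h)
          exact ⟨t', List.mem_cons_of_mem _ ht', he⟩

-- runs never merge across a gi boundary
theorem pgMergeRuns_append {p q : List (Int × String × String × String)} {n : Int}
    (hp : ∀ t ∈ p, t.1 < n) (hq : ∀ t ∈ q, n ≤ t.1) :
    pgMergeRuns (p ++ q) = pgMergeRuns p ++ pgMergeRuns q := by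
  induction p with
  | nil => simp [pgMergeRuns]
  | cons t ts ih =>
    obtain ⟨gi, k, it, m⟩ := t
    have hgi : gi < n := hp (gi, k, it, m) (List.mem_cons_self ..)
    have ihts := ih (fun t ht => hp t (List.mem_cons_of_mem _ ht))
    simp only [List.cons_append, pgMergeRuns, ihts]
    rcases hm : pgMergeRuns ts with _ | ⟨r0, rs⟩
    · have hts : ts = [] := (pgMergeRuns_eq_nil_iff ts).1 hm
      subst hts
      simp only [List.nil_append]
      rcases hq' : pgMergeRuns q with _ | ⟨rq, rqs⟩
      · simp
      · have : n ≤ rq.1 := by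
          obtain ⟨t', ht', he⟩ := pgMergeRuns_gi_mem (by rw [hq']; exact List.mem_cons_self ..)
          exact he ▸ hq t' ht'
        have : ¬ rq.1 = gi := by omega
        simp [this]
    · have : r0.1 < n := by
        obtain ⟨t', ht', he⟩ := pgMergeRuns_gi_mem (by rw [hm]; exact List.mem_cons_self ..)
        exact he ▸ (fun t ht => hp t (List.mem_cons_of_mem _ ht)) t' ht'
      by_cases h0 : r0.1 = gi <;> simp [h0]

theorem pgMergeRuns_tags {n : Int} {k m : String} {its : List String} (h : its ≠ []) :
    pgMergeRuns (pgTags n k m its) = [(n, k, its, m)] := by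
  induction its with
  | nil => simp at h
  | cons it rest ih =>
    rcases rest with _ | ⟨it2, rest2⟩
    · simp [pgTags, pgMergeRuns]
    · have h2 := ih (by simp)
      simp only [pgTags, List.map_cons] at h2 ⊢
      rw [pgMergeRuns_cons, h2]
      simp

theorem pgFullCM_eq (l : List (Int × String × String × String)) : pgFullCM l =
    if 10 ≤ l.length then ((l.take 10) :: (pgFullCM (l.drop 10)).1, (pgFullCM (l.drop 10)).2)
    else ([], l) := by
  rw [pgFullCM.eq_def]; split <;> rfl

theorem pgFullCM_snd_lt (l : List (Int × String × String × String)) : (pgFullCM l).2.length < 10 := by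
  fun_induction pgFullCM l with
  | case1 l h r ih => exact ih
  | case2 l h => simpa using Nat.lt_of_not_le h

theorem pgFullCM_snd_mem {l : List (Int × String × String × String)} {t : Int × String × String × String}
    (h : t ∈ (pgFullCM l).2) : t ∈ l := by
  fun_induction pgFullCM l with
  | case1 l hl r ih => exact List.mem_of_mem_drop (ih h)
  | case2 l hl => exact h

theorem pgFullCM_append (a b : List (Int × String × String × String)) :
    pgFullCM (a ++ b) = ((pgFullCM a).1 ++ (pgFullCM ((pgFullCM a).2 ++ b)).1,
                         (pgFullCM ((pgFullCM a).2 ++ b)).2) := by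
  fun_induction pgFullCM a with
  | case1 a ha r ih =>
    have h2 : 10 ≤ (a ++ b).length := by simp; omega
    rw [pgFullCM_eq (a ++ b)]
    simp only [h2, if_true, List.take_append_of_le_length ha, List.drop_append_of_le_length ha]
    simp [ih, r]
  | case2 a ha => simp

-- suffix-recursion view of B's chunking loop (proof helper)
def pgChunks : List (Int × String × String × String) → List (List (String × List String × String))
  | [] => []
  | t :: ts =>
    let flat := t :: ts
    ((pgMergeRuns (flat.take 10)).map (fun r => (r.2.1, r.2.2.1, r.2.2.2))) :: pgChunks (flat.drop 10)
  termination_by l => l.length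
  decreasing_by simp

theorem pgLoopB_eq_chunks_aux (flat : List (Int × String × String × String)) :
    ∀ (n i : Nat), flat.length - i ≤ n → pgLoopB flat i = pgChunks (flat.drop i) := by
  intro n
  induction n with
  | zero =>
    intro i hi
    rw [pgLoopB]
    have h : ¬ i < flat.length := by omega
    simp only [h, dite_false]
    rw [List.drop_eq_nil_iff.2 (by omega), pgChunks]
  | succ n ihn =>
    intro i hi
    rw [pgLoopB]
    by_cases h : i < flat.length
    · simp only [h, dite_true]
      rw [ihn (i + 10) (by omega)]
      have hne : flat.drop i ≠ [] := by
        intro hc; rw [List.drop_eq_nil_iff] at hc; omega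
      obtain ⟨t, ts, hts⟩ := List.exists_cons_of_ne_nil hne
      rw [hts, pgChunks]
      have hdd : (flat.drop i).drop 10 = flat.drop (i + 10) := by
        rw [List.drop_drop]
      rw [← hts, hdd]
    · simp only [h, dite_false]
      rw [List.drop_eq_nil_iff.2 (by omega), pgChunks]

theorem pgLoopB_eq_chunks (flat : List (Int × String × String × String)) (i : Nat) :
    pgLoopB flat i = pgChunks (flat.drop i) :=
  pgLoopB_eq_chunks_aux flat flat.length i (by omega)

theorem pgChunks_eq_fullCM (l : List (Int × String × String × String)) :
    pgChunks l = (pgFullCM l).1.map pgStrip ++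
      (if (pgFullCM l).2 = [] then [] else [pgStrip (pgFullCM l).2]) := by
  fun_induction pgChunks l with
  | case1 => rw [pgFullCM_eq]; simp
  | case2 t ts flat ih =>
    have hflat : t :: ts = flat := rfl
    rw [pgFullCM_eq, hflat]
    by_cases h : 10 ≤ flat.length
    · simp only [h, if_true]
      simp [pgStrip, ih]
    · have hd : flat.drop 10 = [] := by rw [List.drop_eq_nil_iff]; omega
      have ht : flat.take 10 = flat := List.take_of_length_le (by omega)
      simp only [h, if_false]
      simp [hd, ht, pgStrip, pgChunks]

-- membership in one group's tags fixes the tag index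
theorem pgTags_gi {n : Int} {k m : String} {its : List String} {t : Int × String × String × String}
    (h : t ∈ pgTags n k m its) : t.1 = n := by
  simp [pgTags, List.mem_map] at h
  obtain ⟨it, _, rfl⟩ := h
  rfl

theorem pgStrip_append_tags {p : List (Int × String × String × String)} {n : Int} {k m : String}
    {its : List String} (hn : ∀ t ∈ p, t.1 < n) (hne : its ≠ []) :
    pgStrip (p ++ pgTags n k m its) = pgStrip p ++ [(k, its, m)] := by
  unfold pgStrip
  rw [pgMergeRuns_append hn (fun t ht => le_of_eq (pgTags_gi ht).symm), pgMergeRuns_tags hne]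
  simp

theorem pgStrip_eq_nil_iff (c : List (Int × String × String × String)) :
    pgStrip c = [] ↔ c = [] := by
  unfold pgStrip
  rw [List.map_eq_nil_iff, pgMergeRuns_eq_nil_iff]

-- the inner while loop, characterised by chunk-and-merge of p ++ the group's tagged items
theorem pgWhileA_eq (k m : String) : ∀ (N : Nat) (its : List String), its.length ≤ N →
    ∀ (p : List (Int × String × String × String))
      (pages : List (List (String × List String × String))) (n : Int),
    p.length < 10 → (∀ t ∈ p, t.1 < n) →
    pgWhileA k m p.length (pgStrip p) pages its
      = (pages ++ (pgFullCM (p ++ pgTags n k m its)).1.map pgStrip,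
         pgStrip (pgFullCM (p ++ pgTags n k m its)).2,
         (pgFullCM (p ++ pgTags n k m its)).2.length) := by
  intro N
  induction N with
  | zero =>
    intro its hN p pages n hp hn
    have : its = [] := List.eq_nil_of_length_eq_zero (Nat.le_zero.1 hN)
    subst this
    rw [pgFullCM_eq]
    have : ¬ 10 ≤ (p ++ pgTags n k m []).length := by simp [pgTags]; omega
    simp only [this, if_false]
    simp [pgWhileA, pgTags, pgStrip]
  | succ N ihN =>
    intro its hN p pages n hp hn
    match its with
    | [] =>
      rw [pgFullCM_eq]
      have : ¬ 10 ≤ (p ++ pgTags n k m ([] : List String)).length := by simp [pgTags]; omega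
      simp only [this, if_false]
      simp [pgWhileA, pgTags, pgStrip]
    | it :: rest =>
      have hlen : (it :: rest).length = rest.length + 1 := rfl
      set its := it :: rest with hits
      have htklb : 1 ≤ min (10 - p.length) its.length := by
        simp [hits]; omega
      rw [pgWhileA]
      simp only [← hits]
      have htk0 : ¬ (min (10 - p.length) its.length = 0) := by omega
      simp only [htk0, dite_false]
      set tk := min (10 - p.length) its.length with htk
      have htags_len : (pgTags n k m its).length = its.length := by simp [pgTags]
      by_cases hfull : 10 ≤ p.length + tk
      · -- page becomes full: tk = 10 - p.length, push and continue with an empty page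
        have htk10 : p.length + tk = 10 := by omega
        have htkle : tk ≤ its.length := by omega
        simp only [hfull, if_true]
        have hdroplen : (its.drop tk).length ≤ N := by
          simp [hits]; omega
        have hrec := ihN (its.drop tk) hdroplen [] (pages ++ [pgStrip p ++ [(k, its.take tk, m)]]) n
          (by simp) (by simp)
        have hstrip0 : pgStrip ([] : List (Int × String × String × String)) = [] := rfl
        rw [hstrip0] at hrec
        simp only [List.length_nil] at hrec
        rw [hrec]
        -- right-hand side: the first chunk of p ++ tags is p ++ tags of the taken slice
        have hq10 : 10 ≤ (p ++ pgTags n k m its).length := by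
          rw [List.length_append, htags_len]; omega
        rw [pgFullCM_eq (p ++ pgTags n k m its)]
        simp only [hq10, if_true]
        have hptk : p.take (p.length + tk) = p := List.take_of_length_le (by omega)
        have hpdr : p.drop (p.length + tk) = [] := by rw [List.drop_eq_nil_iff]; omega
        have htake : (p ++ pgTags n k m its).take 10 = p ++ pgTags n k m (its.take tk) := by
          rw [← htk10, List.take_append, hptk, pgTags, pgTags, ← List.map_take,
            Nat.add_sub_cancel_left]
        have hdrop : (p ++ pgTags n k m its).drop 10 = pgTags n k m (its.drop tk) := by
          rw [← htk10, List.drop_append, hpdr, pgTags, pgTags, ← List.map_drop,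
            Nat.add_sub_cancel_left, List.nil_append]
        rw [htake, hdrop]
        have hslice : pgStrip (p ++ pgTags n k m (its.take tk)) = pgStrip p ++ [(k, its.take tk, m)] :=
          pgStrip_append_tags hn (by
            have : (its.take tk).length = tk := List.length_take_of_le htkle
            intro hc; rw [hc] at this; simp at this; omega)
        simp [hslice, List.nil_append]
      · -- all remaining items fit on the current page: tk = its.length, loop ends
        have htkeq : tk = its.length := by simp [htk, hits]; omega
        have hdrop : its.drop tk = [] := by rw [htkeq, List.drop_length]
        have htake : its.take tk = its := by rw [htkeq, List.take_length]
        simp only [hfull, if_false]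
        rw [hdrop, htake, pgWhileA]
        rw [pgFullCM_eq (p ++ pgTags n k m its)]
        have : ¬ 10 ≤ (p ++ pgTags n k m its).length := by
          rw [List.length_append, htags_len]; omega
        simp only [this, if_false]
        have hne : its ≠ [] := by simp [hits]
        rw [pgStrip_append_tags hn hne]
        simp [htags_len, htkeq]

-- the outer for loop over the groups
theorem pgFoldA_eq : ∀ (gs : List (String × List String × String)) (n : Int)
    (p : List (Int × String × String × String))
    (pages : List (List (String × List String × String))),
    p.length < 10 → (∀ t ∈ p, t.1 < n) →
    gs.foldl (fun (st : List (List (String × List String × String)) × List (String × List String × String) × Nat) g =>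
        pgWhileA g.1 g.2.2 st.2.2 st.2.1 st.1 g.2.1) (pages, pgStrip p, p.length)
      = (pages ++ (pgFullCM (p ++ pgFlatFrom n gs)).1.map pgStrip,
         pgStrip (pgFullCM (p ++ pgFlatFrom n gs)).2,
         (pgFullCM (p ++ pgFlatFrom n gs)).2.length) := by
  intro gs
  induction gs with
  | nil =>
    intro n p pages hp hn
    rw [pgFullCM_eq]
    have : ¬ 10 ≤ (p ++ pgFlatFrom n []).length := by simp [pgFlatFrom]; omega
    simp only [this, if_false]
    simp [pgFlatFrom]
  | cons g gs ih =>
    intro n p pages hp hn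
    obtain ⟨k, its, m⟩ := g
    rw [List.foldl_cons]
    have hstep := pgWhileA_eq k m its.length its (le_refl _) p pages n hp hn
    simp only at hstep
    rw [hstep]
    set q := p ++ pgTags n k m its with hq
    have h1 : (pgFullCM q).2.length < 10 := pgFullCM_snd_lt q
    have h2 : ∀ t ∈ (pgFullCM q).2, t.1 < n + 1 := by
      intro t ht
      rcases List.mem_append.1 (pgFullCM_snd_mem ht) with h | h
      · exact lt_trans (hn t h) (by omega)
      · rw [pgTags_gi h]; omega
    have := ih (n + 1) ((pgFullCM q).2) (pages ++ (pgFullCM q).1.map pgStrip) h1 h2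
    rw [this]
    have hsplit : p ++ pgFlatFrom n ((k, its, m) :: gs) = q ++ pgFlatFrom (n + 1) gs := by
      rw [hq, List.append_assoc]; rfl
    rw [hsplit, pgFullCM_append q (pgFlatFrom (n + 1) gs)]
    simp

-- B's flat list is the tagged flattening from index 0
theorem pgFlat_eq (gs : List (String × List String × String)) :
    ∀ s : Int, (PySem.List.enumerate gs s).flatMap
      (fun p => p.2.2.1.map (fun it => (p.1, p.2.1, it, p.2.2.2))) = pgFlatFrom s gs := by
  induction gs with
  | nil => intro s; simp [PySem.List.enumerate_nil, pgFlatFrom]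
  | cons g gs ih =>
    intro s
    obtain ⟨k, its, m⟩ := g
    rw [PySem.List.enumerate_cons, List.flatMap_cons, ih (s + 1)]
    rfl

-- ===== VERDICT (by name: the statement is the Claim_ definition above) =====
theorem paginate_groups_spec : Claim_equal_paginate_groups := by
  intro gs _
  unfold Spec_paginate_groups paginate_groups paginate_groups_alt
  have h0 : (([], [], 0) : List (List (String × List String × String)) × List (String × List String × String) × Nat)
      = ([], pgStrip [], ([] : List (Int × String × String × String)).length) := rfl
  rw [h0, pgFoldA_eq gs 0 [] [] (by simp) (by simp)]
  set F := pgFlatFrom 0 gs with hF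
  have hflat : pgFlat gs = F := pgFlat_eq gs 0
  have hloop : pgLoopB (pgFlat gs) 0 = (pgFullCM F).1.map pgStrip ++
      (if (pgFullCM F).2 = [] then [] else [pgStrip (pgFullCM F).2]) := by
    rw [pgLoopB_eq_chunks (pgFlat gs) 0, List.drop_zero, hflat]; exact pgChunks_eq_fullCM F
  rw [hloop]
  by_cases hr : (pgFullCM F).2 = []
  · simp [hr, pgStrip, pgMergeRuns, List.map_eq_nil_iff]
  · have : pgStrip (pgFullCM F).2 ≠ [] := fun hc => hr ((pgStrip_eq_nil_iff _).1 hc)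
    simp [hr, this]
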